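-- pv_equiv track=rewrite | github.com/Adrian-Garcia/Python-Algorithms | math/lookAndSay.py | generateNewLevel
-- ===== SOURCE A (Python) =====
-- def generateNewLevel(prevLevel) -> str:
--     newChar = prevLevel[0]
--     newLevel = ""
--     count = 0
--
--     for i in range(len(prevLevel)):
--         if newChar == prevLevel[i]:
--             count += 1
--         else:
--             newLevel += str(count) + newChar
--             count = 1
--             newChar = prevLevel[i]
--
--     newLevel += str(count) + newChar
--     return newLevel
-- ===== SOURCE B (Python) =====
-- def generateNewLevel(prevLevel) -> str:
--     # Two-pointer run extraction: find each maximal run [i, j), emit its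
--     # length and character, jump to j.  No per-character state machine,
--     # no trailing flush.
--     parts = []
--     i = 0
--     n = len(prevLevel)
--     while i < n:
--         j = i
--         while j < n and prevLevel[j] == prevLevel[i]:
--             j += 1
--         parts.append(str(j - i) + prevLevel[i])
--         i = j
--     return "".join(parts)
-- ===== Notes on version B (the rewrite author's own statement) =====
-- stated objective: alternative
-- what changed: Replaced A's per-character state machine (newChar/count accumulator with a trailing flush) by two-pointer run extraction: an outer loop jumps from run start to run start, an inner scan finds each run's end, and the pieces are joined at the end.
import Mathlib
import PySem

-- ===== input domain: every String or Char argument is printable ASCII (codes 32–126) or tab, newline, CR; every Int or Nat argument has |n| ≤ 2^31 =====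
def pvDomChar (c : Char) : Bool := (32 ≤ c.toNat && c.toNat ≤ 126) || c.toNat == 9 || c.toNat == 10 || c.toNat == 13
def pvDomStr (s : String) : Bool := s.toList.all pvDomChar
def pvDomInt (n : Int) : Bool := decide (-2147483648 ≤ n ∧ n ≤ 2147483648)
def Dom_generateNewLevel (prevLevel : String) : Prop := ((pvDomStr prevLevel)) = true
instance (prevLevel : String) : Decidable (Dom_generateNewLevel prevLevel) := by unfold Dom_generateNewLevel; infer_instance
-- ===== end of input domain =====

-- B replaces A's per-character state machine (count/newChar + trailing flush) by
-- two-pointer run extraction; same O(n) cost, different decomposition.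


-- ===== PORT A =====
-- A's for-loop over range(len(prevLevel)) reads prevLevel[i] in order; ported as
-- structural recursion over the character list with the same state (newChar, newLevel, count).
def genGoA (l : List Char) (newChar : Char) (newLevel : String) (count : Int) : String :=
  match l with
  | [] => newLevel ++ PySem.Int.toStr count ++ String.ofList [newChar]
  | c :: rest =>
      if newChar == c then genGoA rest newChar newLevel (count + 1)
      else genGoA rest c (newLevel ++ PySem.Int.toStr count ++ String.ofList [newChar]) 1

def generateNewLevel (prevLevel : String) : String :=
  match prevLevel.toList with
  | [] => ""   -- Python A raises IndexError here (prevLevel[0]); outside Pre_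
  | c :: _ => genGoA prevLevel.toList c "" 0

-- ===== PORT B =====
-- B's inner while loop scanning the run [i, j) is the takeWhile/dropWhile split;
-- the outer while loop is the recursion on the rest.
def genGoB (l : List Char) : String :=
  match l with
  | [] => ""
  | c :: rest =>
      PySem.Int.toStr (1 + (rest.takeWhile (· == c)).length) ++ String.ofList [c]
        ++ genGoB (rest.dropWhile (· == c))
termination_by l.length
decreasing_by
  simpa using Nat.lt_succ_of_le (List.length_dropWhile_le (· == c) rest)

def generateNewLevel_alt (prevLevel : String) : String := genGoB prevLevel.toList

-- ===== PRECONDITION & SPEC =====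
-- Pre_ excludes only the empty string, on which Python A raises IndexError.
def Pre_generateNewLevel (prevLevel : String) : Prop := prevLevel ≠ ""
instance (prevLevel : String) : Decidable (Pre_generateNewLevel prevLevel) := by
  unfold Pre_generateNewLevel; infer_instance
def pvWitness_generateNewLevel : String := "111221"

def Spec_generateNewLevel (prevLevel : String) (out : String) : Prop := out = generateNewLevel_alt prevLevel
instance (prevLevel : String) (out : String) : Decidable (Spec_generateNewLevel prevLevel out) := by unfold Spec_generateNewLevel; infer_instance

-- ===== CLAIM (what is proved, stated in full; the proofs are below) =====
def Claim_equal_generateNewLevel : Prop := ∀ (prevLevel : String), Dom_generateNewLevel prevLevel → Pre_generateNewLevel prevLevel → Spec_generateNewLevel prevLevel (generateNewLevel prevLevel)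

-- ===== LEMMAS AND PROOFS =====

lemma takeWhile_drop_run (c c' : Char) (rest : List Char) (m : Nat)
    (h : (c' == c) = false) :
    (List.replicate m c ++ c' :: rest).takeWhile (· == c) = List.replicate m c ∧
    (List.replicate m c ++ c' :: rest).dropWhile (· == c) = c' :: rest := by
  induction m with
  | zero => simp [h]
  | succ m ih => simp [List.replicate_succ, ih]

lemma genGoB_replicate (c : Char) (m : Nat) :
    genGoB (List.replicate (m + 1) c) =
      PySem.Int.toStr ((m + 1 : Nat) : Int) ++ String.ofList [c] := by
  rw [List.replicate_succ, genGoB]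
  simp only [List.takeWhile_replicate, List.dropWhile_replicate, beq_self_eq_true,
    if_true, List.length_replicate]
  rw [genGoB]
  have h1 : (1 + (m : Int)) = ((m + 1 : Nat) : Int) := by push_cast; ring
  simp [h1]

lemma genGoB_run (c c' : Char) (rest : List Char) (m : Nat) (h : (c' == c) = false) :
    genGoB (List.replicate (m + 1) c ++ c' :: rest) =
      PySem.Int.toStr ((m + 1 : Nat) : Int) ++ String.ofList [c] ++ genGoB (c' :: rest) := by
  obtain ⟨ht, hd⟩ := takeWhile_drop_run c c' rest m h
  rw [List.replicate_succ, List.cons_append, genGoB, ht, hd, List.length_replicate]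
  have h1 : (1 + (m : Int)) = ((m + 1 : Nat) : Int) := by push_cast; ring
  simp [h1, String.append_assoc]

-- Invariant: A's loop state (count = m+1 copies of c already seen, accumulator acc)
-- produces acc ++ B's encoding of those copies followed by the rest.
lemma genGoA_eq (l : List Char) : ∀ (c : Char) (acc : String) (m : Nat),
    genGoA l c acc ((m + 1 : Nat) : Int) = acc ++ genGoB (List.replicate (m + 1) c ++ l) := by
  induction l with
  | nil =>
      intro c acc m
      rw [genGoA, List.append_nil, genGoB_replicate, String.append_assoc]
  | cons c' rest ih =>
      intro c acc m
      rw [genGoA]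
      by_cases h : c = c'
      · subst h
        simp only [beq_self_eq_true, if_true]
        have hcast : ((m + 1 : Nat) : Int) + 1 = ((m + 1 + 1 : Nat) : Int) := by push_cast; ring
        rw [hcast, ih c acc (m + 1)]
        have hlist : List.replicate (m + 1 + 1) c ++ rest =
            List.replicate (m + 1) c ++ c :: rest := by
          simp [List.replicate_succ', List.append_assoc]
        rw [hlist]
      · have hb : (c == c') = false := by simp [h]
        have hb' : (c' == c) = false := by simp [Ne.symm h]
        rw [if_neg (by simp [hb])]
        rw [show (1 : Int) = ((0 + 1 : Nat) : Int) by norm_num, ih c' _ 0]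
        rw [genGoB_run c c' rest m hb']
        simp [String.append_assoc]

-- ===== VERDICT (by name: the statement is the Claim_ definition above) =====
theorem generateNewLevel_spec : Claim_equal_generateNewLevel := by
  intro s _ hpre
  unfold Spec_generateNewLevel generateNewLevel generateNewLevel_alt
  have hne : s.toList ≠ [] := by
    intro h
    exact hpre (String.toList_inj.mp (by rw [h]; simp))
  rcases hl : s.toList with _ | ⟨c, rest⟩
  · exact absurd hl hne
  · simp only
    rw [genGoA]
    simp only [beq_self_eq_true, if_true]
    rw [show (0 : Int) + 1 = ((0 + 1 : Nat) : Int) by norm_num, genGoA_eq rest c "" 0]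
    rw [show List.replicate (0 + 1) c ++ rest = c :: rest by rfl]
    exact String.empty_append
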